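-- pv_equiv track=rewrite | github.com/yanxurui/keepcoding | python/algorithm/foobar/6.py | answer0
-- ===== SOURCE A (Python) =====
-- def answer0(start, length):
--     def gen(start, length):
--         for i in range(length):
--             for j in range(length - i):
--                 yield start
--                 start += 1
--             start += i
--
--     result = 0
--     for i in gen(start, length):
--         result = result ^ i
--     return result
-- ===== SOURCE B (Python) =====
-- def answer0(start, length):
--     def range_xor(a, b):
--         # XOR of all integers in [a, b): consecutive pair (2k, 2k+1) XORs to 1
--         if a >= b:
--             return 0
--         r = 0
--         if a % 2 != 0:
--             r ^= a
--             a += 1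
--         half = (b - a) // 2
--         if half % 2 != 0:
--             r ^= 1
--         if (b - a) % 2 != 0:
--             r ^= b - 1
--         return r
--
--     result = 0
--     row = start
--     for i in range(length):
--         result ^= range_xor(row, row + length - i)
--         row += length
--     return result
-- ===== Notes on version B (the rewrite author's own statement) =====
-- stated objective: faster
-- what changed: B replaces A's generator that yields every ID one by one (O(length^2) items, each XORed individually) with a single loop over the rows, XORing each consecutive row range in O(1) via the pairing identity (2k)^(2k+1)=1.
import Mathlib
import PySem

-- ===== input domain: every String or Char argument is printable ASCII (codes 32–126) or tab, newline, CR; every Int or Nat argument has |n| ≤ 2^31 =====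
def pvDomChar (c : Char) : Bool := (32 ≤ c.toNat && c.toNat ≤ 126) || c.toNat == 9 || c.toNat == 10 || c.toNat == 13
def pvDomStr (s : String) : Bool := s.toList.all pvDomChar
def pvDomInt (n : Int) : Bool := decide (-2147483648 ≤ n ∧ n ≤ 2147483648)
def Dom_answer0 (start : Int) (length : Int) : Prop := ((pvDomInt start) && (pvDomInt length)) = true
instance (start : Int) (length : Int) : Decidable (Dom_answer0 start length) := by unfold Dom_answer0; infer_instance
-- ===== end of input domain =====

-- B replaces A's element-by-element generator (O(length^2) XORs) with one loop over the rows,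
-- XORing each consecutive row range in O(1) via the pairing identity (2k)^(2k+1)=1.

-- ===== PORT A =====
def answer0 (start : Int) (length : Int) : Int :=
  -- the generator materialised as the list of yielded values, threading `start`
  let gen := (PySem.List.pyRange 0 length).foldl
    (fun (st : Int × List Int) (i : Int) =>
      let inner := (PySem.List.pyRange 0 (length - i)).foldl
        (fun (p : Int × List Int) (_ : Int) => (p.1 + 1, p.2 ++ [p.1])) st
      (inner.1 + i, inner.2))
    (start, [])
  gen.2.foldl (fun r i => PySem.Int.bxor r i) 0

-- ===== PORT B =====
-- XOR of all integers in [a, b) in O(1)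
def pvRangeXor (a : Int) (b : Int) : Int :=
  if a ≥ b then 0
  else
    let r : Int := 0
    let p := if PySem.Int.mod a 2 ≠ 0 then (PySem.Int.bxor r a, a + 1) else (r, a)
    let r := p.1
    let a := p.2
    let half := PySem.Int.floordiv (b - a) 2
    let r := if PySem.Int.mod half 2 ≠ 0 then PySem.Int.bxor r 1 else r
    let r := if PySem.Int.mod (b - a) 2 ≠ 0 then PySem.Int.bxor r (b - 1) else r
    r

def answer0_alt (start : Int) (length : Int) : Int :=
  ((PySem.List.pyRange 0 length).foldl
    (fun (st : Int × Int) (i : Int) =>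
      (PySem.Int.bxor st.1 (pvRangeXor st.2 (st.2 + length - i)), st.2 + length))
    (0, start)).1

-- ===== PRECONDITION & SPEC =====
def Spec_answer0 (start : Int) (length : Int) (out : Int) : Prop := out = answer0_alt start length
instance (start : Int) (length : Int) (out : Int) : Decidable (Spec_answer0 start length out) := by unfold Spec_answer0; infer_instance

-- ===== CLAIM (what is proved, stated in full; the proofs are below) =====
def Claim_equal_answer0 : Prop := ∀ (start : Int) (length : Int), Dom_answer0 start length → Spec_answer0 start length (answer0 start length)

-- ===== LEMMAS AND PROOFS =====

-- the list of the n consecutive integers starting at a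
def pvRow (a : Int) (n : Nat) : List Int := (List.range n).map (fun (j : Nat) => a + (j : Int))

-- two's-complement bit reading of an Int (Python's view)
def pvBit (a : Int) (i : Nat) : Bool :=
  if 0 ≤ a then a.toNat.testBit i else !((-a - 1).toNat.testBit i)

theorem pvBit_bxor (a b : Int) (i : Nat) :
    pvBit (PySem.Int.bxor a b) i = ((pvBit a i).xor (pvBit b i)) := by
  unfold pvBit PySem.Int.bxor
  rcases (show (0:Int) ≤ a ∨ a < 0 by omega) with ha | ha <;> rcases (show (0:Int) ≤ b ∨ b < 0 by omega) with hb | hb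
  · rw [if_pos ha, if_pos hb, if_pos ha, if_pos hb,
      if_pos (by positivity : (0:Int) ≤ ((a.toNat ^^^ b.toNat : Nat) : Int))]
    simp [Nat.testBit_xor]
  · have hb' : ¬ (0:Int) ≤ b := not_le.mpr hb
    rw [if_pos ha, if_neg hb', if_pos ha, if_neg hb',
      if_neg (show ¬ (0:Int) ≤ -((a.toNat ^^^ (-b-1).toNat : Nat) : Int) - 1 by
        have := Int.natCast_nonneg (a.toNat ^^^ (-b-1).toNat); omega)]
    have h1 : (-(-((a.toNat ^^^ (-b-1).toNat : Nat) : Int) - 1) - 1)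
        = ((a.toNat ^^^ (-b-1).toNat : Nat) : Int) := by ring
    rw [h1, Int.toNat_natCast, Nat.testBit_xor]
    cases a.toNat.testBit i <;> cases (-b-1).toNat.testBit i <;> rfl
  · have ha' : ¬ (0:Int) ≤ a := not_le.mpr ha
    rw [if_neg ha', if_pos hb, if_neg ha', if_pos hb,
      if_neg (show ¬ (0:Int) ≤ -(((-a-1).toNat ^^^ b.toNat : Nat) : Int) - 1 by
        have := Int.natCast_nonneg ((-a-1).toNat ^^^ b.toNat); omega)]
    have h1 : (-(-(((-a-1).toNat ^^^ b.toNat : Nat) : Int) - 1) - 1)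
        = (((-a-1).toNat ^^^ b.toNat : Nat) : Int) := by ring
    rw [h1, Int.toNat_natCast, Nat.testBit_xor]
    cases (-a-1).toNat.testBit i <;> cases b.toNat.testBit i <;> rfl
  · have ha' : ¬ (0:Int) ≤ a := not_le.mpr ha
    have hb' : ¬ (0:Int) ≤ b := not_le.mpr hb
    rw [if_neg ha', if_neg hb', if_neg ha', if_neg hb',
      if_pos (by positivity : (0:Int) ≤ (((-a-1).toNat ^^^ (-b-1).toNat : Nat) : Int))]
    rw [Int.toNat_natCast, Nat.testBit_xor]
    cases (-a-1).toNat.testBit i <;> cases (-b-1).toNat.testBit i <;> rfl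

theorem pvBit_inj (a b : Int) (h : ∀ i, pvBit a i = pvBit b i) : a = b := by
  rcases (show (0:Int) ≤ a ∨ a < 0 by omega) with ha | ha <;> rcases (show (0:Int) ≤ b ∨ b < 0 by omega) with hb | hb
  · have h2 : a.toNat = b.toNat :=
      Nat.eq_of_testBit_eq (fun i => by simpa [pvBit, ha, hb] using h i)
    omega
  · exfalso
    have hi := h (a.toNat + (-b-1).toNat)
    simp only [pvBit, if_pos ha, if_neg (not_le.mpr hb)] at hi
    rw [Nat.testBit_eq_false_of_lt
        (lt_of_lt_of_le Nat.lt_two_pow_self (Nat.pow_le_pow_right (by norm_num) (by omega))),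
      Nat.testBit_eq_false_of_lt
        (lt_of_lt_of_le Nat.lt_two_pow_self (Nat.pow_le_pow_right (by norm_num) (by omega)))] at hi
    simp at hi
  · exfalso
    have hi := h ((-a-1).toNat + b.toNat)
    simp only [pvBit, if_neg (not_le.mpr ha), if_pos hb] at hi
    rw [Nat.testBit_eq_false_of_lt
        (lt_of_lt_of_le Nat.lt_two_pow_self (Nat.pow_le_pow_right (by norm_num) (by omega))),
      Nat.testBit_eq_false_of_lt
        (lt_of_lt_of_le Nat.lt_two_pow_self (Nat.pow_le_pow_right (by norm_num) (by omega)))] at hi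
    simp at hi
  · have h2 : (-a-1).toNat = (-b-1).toNat :=
      Nat.eq_of_testBit_eq (fun i =>
        Bool.not_inj (by simpa [pvBit, not_le.mpr ha, not_le.mpr hb] using h i))
    omega

theorem pv_bxor_assoc (a b c : Int) :
    PySem.Int.bxor (PySem.Int.bxor a b) c = PySem.Int.bxor a (PySem.Int.bxor b c) := by
  apply pvBit_inj
  intro i
  simp [pvBit_bxor]

theorem pv_zero_bxor (a : Int) : PySem.Int.bxor 0 a = a := by
  rw [PySem.Int.bxor_comm]; exact PySem.Int.bxor_zero a

theorem pv_even_bxor_succ (a : Int) (ha : a % 2 = 0) :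
    PySem.Int.bxor a (a + 1) = 1 := by
  apply pvBit_inj
  intro i
  rw [pvBit_bxor]
  cases i with
  | zero =>
    have h1 : pvBit 1 0 = true := by decide
    rw [h1]
    unfold pvBit
    rcases (show (0:Int) ≤ a ∨ a < 0 by omega) with hge | hlt
    · rw [if_pos hge, if_pos (by omega : (0:Int) ≤ a + 1)]
      have e1 : a.toNat % 2 = 0 := by omega
      have e2 : (a+1).toNat % 2 = 1 := by omega
      simp [Nat.testBit_zero, e1, e2]
    · rw [if_neg (by omega : ¬ (0:Int) ≤ a), if_neg (by omega : ¬ (0:Int) ≤ a + 1)]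
      have e1 : (-a-1).toNat % 2 = 1 := by omega
      have e2 : (-(a+1)-1).toNat % 2 = 0 := by omega
      rw [Nat.testBit_zero, Nat.testBit_zero, e1, e2]
      rfl
  | succ i =>
    have h1 : pvBit 1 (i+1) = false := by
      unfold pvBit
      rw [if_pos (by norm_num : (0:Int) ≤ 1)]
      simp [Nat.testBit_succ]
    rw [h1]
    unfold pvBit
    rcases (show (0:Int) ≤ a ∨ a < 0 by omega) with hge | hlt
    · rw [if_pos hge, if_pos (by omega : (0:Int) ≤ a + 1), Nat.testBit_succ, Nat.testBit_succ]
      have e : a.toNat / 2 = (a+1).toNat / 2 := by omega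
      rw [e]
      cases ((a+1).toNat / 2).testBit i <;> rfl
    · rw [if_neg (by omega : ¬ (0:Int) ≤ a), if_neg (by omega : ¬ (0:Int) ≤ a + 1),
        Nat.testBit_succ, Nat.testBit_succ]
      have e : (-a-1).toNat / 2 = (-(a+1)-1).toNat / 2 := by omega
      rw [e]
      cases ((-(a+1)-1).toNat / 2).testBit i <;> rfl

-- closed form for the XOR of pvRow a n when a is even
def pvEvenC (a : Int) (n : Nat) : Int :=
  let r : Int := if (n / 2) % 2 = 1 then 1 else 0
  if n % 2 = 1 then PySem.Int.bxor r (a + n - 1) else r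

theorem pvRow_succ (a : Int) (n : Nat) : pvRow a (n + 1) = a :: pvRow (a + 1) n := by
  unfold pvRow
  rw [List.range_succ_eq_map, List.map_cons, List.map_map]
  refine congrArg₂ List.cons (by simp) ?_
  apply List.map_congr_left
  intro j _
  show a + ((j : Int) + 1) = a + 1 + (j : Int)
  ring

theorem pv_foldl_even (n : Nat) : ∀ (a r : Int), a % 2 = 0 →
    List.foldl PySem.Int.bxor r (pvRow a n) = PySem.Int.bxor r (pvEvenC a n) := by
  induction n using Nat.strong_induction_on with
  | _ n IH =>
    intro a r ha
    rcases n with _ | n1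
    · simp [pvRow, pvEvenC, PySem.Int.bxor_zero]
    · rcases n1 with _ | m
      · rw [pvRow_succ]
        simp [pvRow, pvEvenC, pv_zero_bxor]
      · rw [pvRow_succ, pvRow_succ]
        simp only [List.foldl_cons]
        rw [IH m (by omega) (a+1+1) (PySem.Int.bxor (PySem.Int.bxor r a) (a+1)) (by omega)]
        rw [pv_bxor_assoc r a (a+1), pv_even_bxor_succ a ha,
          pv_bxor_assoc r 1 (pvEvenC (a+1+1) m)]
        congr 1
        unfold pvEvenC
        rcases Nat.mod_two_eq_zero_or_one m with hm | hm <;>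
          rcases Nat.mod_two_eq_zero_or_one (m/2) with hq | hq
        · simp [hm, hq, show (m+2)/2 % 2 = 1 by omega, show (m+2) % 2 = 0 by omega]
        · simp [hm, hq, show (m+2)/2 % 2 = 0 by omega, show (m+2) % 2 = 0 by omega]
        · simp [hm, hq, show (m+2)/2 % 2 = 1 by omega, show (m+2) % 2 = 1 by omega,
            pv_zero_bxor]
          congr 1
          ring
        · simp [hm, hq, show (m+2)/2 % 2 = 0 by omega, show (m+2) % 2 = 1 by omega]
          rw [← pv_bxor_assoc]
          rw [show PySem.Int.bxor 1 1 = 0 from by decide, pv_zero_bxor, pv_zero_bxor]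
          ring

theorem pv_foldl_range (n : Nat) (a r : Int) :
    List.foldl PySem.Int.bxor r (pvRow a n) = PySem.Int.bxor r (pvRangeXor a (a + n)) := by
  rcases Nat.eq_zero_or_pos n with h0 | hn
  · subst h0
    simp [pvRow, pvRangeXor, PySem.Int.bxor_zero]
  · have hn' : (0:Int) < (n:Int) := by exact_mod_cast hn
    have hfd : ∀ m : Nat, PySem.Int.floordiv (m:Int) 2 = ((m/2 : Nat) : Int) := by
      intro m; exact_mod_cast PySem.Int.floordiv_natCast m 2
    have hmd : ∀ m : Nat, PySem.Int.mod (m:Int) 2 = ((m % 2 : Nat) : Int) := by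
      intro m; exact_mod_cast PySem.Int.mod_natCast m 2
    rcases Int.emod_two_eq a with ha | ha
    · rw [pv_foldl_even n a r ha]
      congr 1
      unfold pvEvenC pvRangeXor
      rw [if_neg (by omega : ¬ a ≥ a + (n:Int))]
      have hm0 : PySem.Int.mod a 2 = 0 := by
        rw [PySem.Int.mod_eq_emod_of_pos (by norm_num)]; exact ha
      have e1 : a + (n:Int) - a = (n:Int) := by ring
      simp only [hm0, ne_eq, not_true_eq_false, if_false, e1, hfd, hmd]
      rcases Nat.mod_two_eq_zero_or_one n with hn2 | hn2 <;>
        rcases Nat.mod_two_eq_zero_or_one (n/2) with hq | hq <;>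
          simp [hn2, hq, pv_zero_bxor]
    · obtain ⟨m, rfl⟩ : ∃ m, n = m + 1 := ⟨n-1, by omega⟩
      rw [pvRow_succ]
      simp only [List.foldl_cons]
      rw [pv_foldl_even m (a+1) (PySem.Int.bxor r a) (by omega)]
      rw [pv_bxor_assoc]
      congr 1
      unfold pvEvenC pvRangeXor
      rw [if_neg (by push_cast; omega : ¬ a ≥ a + ((m+1 : Nat) : Int))]
      have hm1 : PySem.Int.mod a 2 = 1 := by
        rw [PySem.Int.mod_eq_emod_of_pos (by norm_num)]; exact ha
      have e1 : a + ((m+1 : Nat) : Int) - (a + 1) = (m:Int) := by push_cast; ring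
      simp only [hm1, ne_eq, one_ne_zero, not_false_eq_true, if_true, e1, hfd, hmd,
        pv_zero_bxor]
      rcases Nat.mod_two_eq_zero_or_one m with hm2 | hm2 <;>
        rcases Nat.mod_two_eq_zero_or_one (m/2) with hq | hq <;>
          simp [hm2, hq, pv_zero_bxor, PySem.Int.bxor_zero]
      · congr 1
        ring
      · rw [← pv_bxor_assoc]
        congr 1
        ring

theorem pv_inner (l : List Int) : ∀ (st : Int × List Int),
    l.foldl (fun (p : Int × List Int) (_ : Int) => (p.1 + 1, p.2 ++ [p.1])) st
      = (st.1 + l.length, st.2 ++ pvRow st.1 l.length) := by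
  induction l with
  | nil => intro st; simp [pvRow]
  | cons x l ih =>
    intro st
    simp only [List.foldl_cons, List.length_cons]
    rw [ih (st.1 + 1, st.2 ++ [st.1])]
    refine Prod.ext ?_ ?_
    · push_cast; ring
    · simp [pvRow_succ]

theorem pv_main (length : Int) (k : Nat) (start : Int) (hk : (k : Int) ≤ length) :
    (((List.range k).map (fun (j : Nat) => (j : Int))).foldl
      (fun (st : Int × List Int) (i : Int) =>
        (((PySem.List.pyRange 0 (length - i)).foldl
            (fun (p : Int × List Int) (_ : Int) => (p.1 + 1, p.2 ++ [p.1])) st).1 + i,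
         ((PySem.List.pyRange 0 (length - i)).foldl
            (fun (p : Int × List Int) (_ : Int) => (p.1 + 1, p.2 ++ [p.1])) st).2))
      (start, [])).1 = start + k * length ∧
    (((List.range k).map (fun (j : Nat) => (j : Int))).foldl
      (fun (st : Int × List Int) (i : Int) =>
        (((PySem.List.pyRange 0 (length - i)).foldl
            (fun (p : Int × List Int) (_ : Int) => (p.1 + 1, p.2 ++ [p.1])) st).1 + i,
         ((PySem.List.pyRange 0 (length - i)).foldl
            (fun (p : Int × List Int) (_ : Int) => (p.1 + 1, p.2 ++ [p.1])) st).2))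
      (start, [])).2.foldl PySem.Int.bxor 0
      = (((List.range k).map (fun (j : Nat) => (j : Int))).foldl
          (fun (st : Int × Int) (i : Int) =>
            (PySem.Int.bxor st.1 (pvRangeXor st.2 (st.2 + length - i)), st.2 + length))
          (0, start)).1 ∧
    (((List.range k).map (fun (j : Nat) => (j : Int))).foldl
      (fun (st : Int × Int) (i : Int) =>
        (PySem.Int.bxor st.1 (pvRangeXor st.2 (st.2 + length - i)), st.2 + length))
      (0, start)).2 = start + k * length := by
  induction k with
  | zero => refine ⟨by simp, by simp, by simp⟩
  | succ k IH =>
    obtain ⟨h1, h2, h3⟩ := IH (by push_cast at hk ⊢; omega)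
    have hc : (((length - (k:Int)).toNat : Nat) : Int) = length - (k:Int) := by
      push_cast at hk; omega
    have hpr : PySem.List.pyRange 0 (length - (k:Int))
        = (List.range (length - (k:Int)).toNat).map (fun (j : Nat) => (j : Int)) := by
      conv_lhs => rw [← hc]
      exact PySem.List.pyRange_zero_natCast _
    rw [List.range_succ, List.map_append]
    simp only [List.foldl_append, List.map_cons, List.map_nil, List.foldl_cons,
      List.foldl_nil]
    rw [hpr, pv_inner]
    simp only [List.foldl_append, List.length_map, List.length_range]
    refine ⟨?_, ?_, ?_⟩
    · rw [h1, hc]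
      push_cast
      ring
    · rw [h2, pv_foldl_range]
      rw [h1, h3]
      congr 2
      rw [hc]
      ring
    · rw [h3]
      push_cast
      ring

-- ===== VERDICT (by name: the statement is the Claim_ definition above) =====
theorem answer0_spec : Claim_equal_answer0 := by
  intro start length _
  unfold Spec_answer0
  rcases (show length ≤ 0 ∨ 0 < length by omega) with hl | hl
  · have hp : PySem.List.pyRange 0 length = [] := by
      simp [PySem.List.pyRange, show ¬ (0:Int) < length from by omega]
    simp [answer0, answer0_alt, hp]
  · obtain ⟨n, rfl⟩ : ∃ n : Nat, length = (n : Int) := ⟨length.toNat, by omega⟩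
    obtain ⟨h1, h2, h3⟩ := pv_main (n:Int) n start le_rfl
    have e := PySem.List.pyRange_zero_natCast n
    unfold answer0 answer0_alt
    rw [e]
    exact h2
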